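-- pv_equiv track=rewrite | github.com/oleksii-shevchenko/sym-crypto-labs | aphine_cipher/bigram_affine_cipher_attack.py | make_bigram_pairs
-- ===== SOURCE A (Python) =====
-- def make_bigram_pairs(x: list, y: list) -> list:
--     x_pairs = []
--     y_pairs = []
--     for i in range(len(x)):
--         for j in range(len(x)):
--             if i != j:
--                 x_pairs.append([x[i], x[j]])
--                 y_pairs.append([y[i], y[j]])
--     pairs = []
--     for i in range(len(x_pairs)):
--         for j in range(len(y_pairs)):
--             pairs.append([[x_pairs[i][0], y_pairs[j][0]], [x_pairs[i][1], y_pairs[j][1]]])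
--     return pairs
-- ===== SOURCE B (Python) =====
-- def _bigrams(z):
--     # ordered distinct pairs, recursively: pivot pairs with prefix+suffix, no indices
--     def go(seen, rest):
--         if not rest:
--             return []
--         a, tail = rest[0], rest[1:]
--         return [(a, b) for b in seen + tail] + go(seen + [a], tail)
--     return go([], list(z))
--
-- def make_bigram_pairs(x: list, y: list) -> list:
--     xb = _bigrams(x)
--     yb = _bigrams(y[:len(x)])
--     return [[[a, c], [b, d]] for (a, b) in xb for (c, d) in yb]
-- ===== Notes on version B (the rewrite author's own statement) =====
-- stated objective: alternative
-- what changed: Replaces A's four index-driven loops over range(len(x)) with i!=j tests and two materialized parallel pair-lists by a recursive prefix/suffix bigram generator (a pivot element is paired with seen+tail, no indices or inequality tests), truncation of y to len(x), and a single cross-product comprehension over the two bigram lists.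
import Mathlib
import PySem

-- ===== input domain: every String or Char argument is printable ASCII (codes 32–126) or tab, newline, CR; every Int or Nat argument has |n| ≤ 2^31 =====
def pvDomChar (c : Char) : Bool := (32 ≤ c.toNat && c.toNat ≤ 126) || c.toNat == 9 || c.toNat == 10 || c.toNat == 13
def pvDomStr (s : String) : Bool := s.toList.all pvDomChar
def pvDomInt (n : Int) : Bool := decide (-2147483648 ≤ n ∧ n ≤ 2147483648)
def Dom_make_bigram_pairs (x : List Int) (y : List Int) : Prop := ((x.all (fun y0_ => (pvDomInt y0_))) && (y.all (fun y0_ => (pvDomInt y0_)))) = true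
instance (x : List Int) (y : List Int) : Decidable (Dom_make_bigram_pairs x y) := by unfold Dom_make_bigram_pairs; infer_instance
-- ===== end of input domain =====

-- B replaces A's four index-driven loops and parallel pair-lists by a recursive prefix/suffix
-- bigram generator (no indices) plus truncation of y and one comprehension (alternative decomposition).


-- ===== PORT A =====
def make_bigram_pairs (x : List Int) (y : List Int) : List (List (List Int)) :=
  let xy : List (List Int) × List (List Int) :=
    (PySem.List.pyRange 0 x.length 1).foldl (fun st i =>
      (PySem.List.pyRange 0 x.length 1).foldl (fun (st : List (List Int) × List (List Int)) j =>
        if i ≠ j then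
          (st.1 ++ [[PySem.List.pyGetD x i 0, PySem.List.pyGetD x j 0]],
           st.2 ++ [[PySem.List.pyGetD y i 0, PySem.List.pyGetD y j 0]])
        else st) st) ([], [])
  let x_pairs := xy.1
  let y_pairs := xy.2
  (PySem.List.pyRange 0 x_pairs.length 1).foldl (fun pairs i =>
    (PySem.List.pyRange 0 y_pairs.length 1).foldl (fun pairs j =>
      pairs ++ [[[PySem.List.pyGetD (PySem.List.pyGetD x_pairs i []) 0 0,
                  PySem.List.pyGetD (PySem.List.pyGetD y_pairs j []) 0 0],
                 [PySem.List.pyGetD (PySem.List.pyGetD x_pairs i []) 1 0,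
                  PySem.List.pyGetD (PySem.List.pyGetD y_pairs j []) 1 0]]]) pairs) []

-- ===== PORT B =====
-- recursive helper 'go' of _bigrams: pivot pairs with prefix ++ suffix, then recurse
def pvGo (seen rest : List Int) : List (Int × Int) :=
  match rest with
  | [] => []
  | a :: tail => ((seen ++ tail).map (fun b => (a, b))) ++ pvGo (seen ++ [a]) tail

def make_bigram_pairs_alt (x : List Int) (y : List Int) : List (List (List Int)) :=
  let xb := pvGo [] x
  let yb := pvGo [] (PySem.List.slice y none (some (x.length : Int)))
  xb.flatMap (fun p => yb.map (fun q => [[p.1, q.1], [p.2, q.2]]))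

-- ===== PRECONDITION & SPEC =====
-- Pre_ excludes exactly the inputs where Python A raises IndexError (y shorter than x with at
-- least two x-elements: y[i]/y[j] is read at every index pair of range(len(x))).
def Pre_make_bigram_pairs (x : List Int) (y : List Int) : Prop :=
  x.length ≤ 1 ∨ x.length ≤ y.length
instance (x : List Int) (y : List Int) : Decidable (Pre_make_bigram_pairs x y) := by
  unfold Pre_make_bigram_pairs; infer_instance
def pvWitness_make_bigram_pairs : List Int × List Int := ([1, 2], [3, 4])

def Spec_make_bigram_pairs (x : List Int) (y : List Int) (out : List (List (List Int))) : Prop := out = make_bigram_pairs_alt x y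
instance (x : List Int) (y : List Int) (out : List (List (List Int))) : Decidable (Spec_make_bigram_pairs x y out) := by unfold Spec_make_bigram_pairs; infer_instance

-- ===== CLAIM (what is proved, stated in full; the proofs are below) =====
def Claim_equal_make_bigram_pairs : Prop := ∀ (x : List Int) (y : List Int), Dom_make_bigram_pairs x y → Pre_make_bigram_pairs x y → Spec_make_bigram_pairs x y (make_bigram_pairs x y)

-- ===== LEMMAS AND PROOFS =====

-- the ordered distinct index pairs, at Nat level (proof-only common normal form)
def pvPairsN (n : Nat) : List (Nat × Nat) :=
  (List.range n).flatMap (fun i => ((List.range n).filter (fun j => i ≠ j)).map (fun j => (i, j)))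

-- A-side index-pair list (as built by A's first double loop)
def pvIdx (n : Nat) : List (Int × Int) :=
  (PySem.List.pyRange 0 n 1).flatMap (fun i =>
    ((PySem.List.pyRange 0 n 1).filter (fun j => i ≠ j)).map (fun j => (i, j)))

lemma mem_pvPairsN {n : Nat} {p : Nat × Nat} (h : p ∈ pvPairsN n) : p.1 < n ∧ p.2 < n := by
  simp only [pvPairsN, List.mem_flatMap, List.mem_map, List.mem_filter, List.mem_range] at h
  obtain ⟨i, hi, j, ⟨hj, _⟩, rfl⟩ := h
  exact ⟨hi, hj⟩

lemma pvIdx_eq (n : Nat) :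
    pvIdx n = (pvPairsN n).map (fun p => ((p.1 : Int), (p.2 : Int))) := by
  simp only [pvIdx, pvPairsN, PySem.List.pyRange_one, List.map_flatMap, List.map_map,
    List.filter_map, List.flatMap_map, Int.sub_zero, Int.toNat_natCast, zero_add]
  refine List.flatMap_congr (fun a _ => ?_)
  rw [List.filter_congr (q := fun k => decide (a ≠ k)) (fun k _ => by simp)]
  simp [Function.comp_def]

lemma map_range_getD (l : List Int) (d : Int) :
    (List.range l.length).map (fun j => l.getD j d) = l := by
  apply List.ext_getElem
  · simp
  · intro i h1 h2
    simp [List.getD_eq_getElem?_getD, List.getElem?_eq_getElem h2]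

lemma map_range_pair (a : Int) (l : List Int) :
    (List.range l.length).map (fun j => (a, l.getD j 0)) = l.map (fun b => (a, b)) := by
  conv_rhs => rw [← map_range_getD l 0]
  rw [List.map_map]
  rfl

-- B's head chunk for pivot position seen.length is the pivot paired with prefix ++ suffix
lemma chunk_eq (seen tail : List Int) (a : Int) :
    ((List.range (seen.length + (a :: tail).length)).filter (fun j => seen.length ≠ j)).map
      (fun j => ((seen ++ a :: tail).getD seen.length 0, (seen ++ a :: tail).getD j 0))
    = (seen ++ tail).map (fun b => (a, b)) := by
  have hz : (seen ++ a :: tail).getD seen.length 0 = a := by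
    rw [List.getD_eq_getElem _ _ (by simp)]
    simp
  have hrange : List.range (seen.length + (a :: tail).length)
      = List.range seen.length ++ (List.range (a :: tail).length).map (seen.length + ·) :=
    List.range_add ..
  have h1 : (List.range seen.length).filter (fun j => seen.length ≠ j)
      = List.range seen.length := by
    rw [List.filter_eq_self]
    intro j hj; simp at hj ⊢; omega
  have e : (List.range (a :: tail).length).map (seen.length + ·)
      = seen.length :: (List.range tail.length).map (fun m => seen.length + (m + 1)) := by
    rw [List.length_cons, List.range_succ_eq_map]
    simp [List.map_map, Function.comp_def, Nat.succ_eq_add_one]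
  have h2 : ((List.range (a :: tail).length).map (seen.length + ·)).filter
        (fun j => seen.length ≠ j)
      = (List.range tail.length).map (fun m => seen.length + (m + 1)) := by
    rw [e, List.filter_cons]
    simp only [ne_eq, not_true_eq_false, decide_false, List.filter_map, Function.comp_def]
    rw [List.filter_eq_self.mpr (fun m _ => by simp)]
    simp
  rw [hrange, List.filter_append, h1, h2]
  simp only [List.map_append]
  congr 1
  · rw [← map_range_pair a seen]
    apply List.map_congr_left
    intro j hj
    simp only [List.mem_range] at hj
    rw [hz, List.getD_eq_getElem _ _ (by simp; omega), List.getElem_append_left hj,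
      List.getD_eq_getElem _ _ hj]
  · rw [← map_range_pair a tail, List.map_map]
    apply List.map_congr_left
    intro m hm
    simp only [List.mem_range, Function.comp_def] at hm ⊢
    rw [hz, List.getD_eq_getElem _ _ (by simp; omega), List.getD_eq_getElem _ _ hm]
    congr 1
    rw [List.getElem_append_right (by omega)]
    have hidx : seen.length + (m + 1) - seen.length = m + 1 := by omega
    simp [hidx]

-- invariant of B's recursion: pvGo seen rest enumerates pivots at positions ≥ seen.length
lemma pvGo_spec : ∀ (rest seen : List Int),
    pvGo seen rest = (List.range' seen.length rest.length).flatMap (fun i =>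
      ((List.range (seen.length + rest.length)).filter (fun j => i ≠ j)).map
        (fun j => ((seen ++ rest).getD i 0, (seen ++ rest).getD j 0))) := by
  intro rest
  induction rest with
  | nil => intro seen; simp [pvGo]
  | cons a tail ih =>
    intro seen
    show ((seen ++ tail).map (fun b => (a, b))) ++ pvGo (seen ++ [a]) tail = _
    rw [ih (seen ++ [a])]
    have hz : seen ++ [a] ++ tail = seen ++ a :: tail := by simp
    have hl : (seen ++ [a]).length = seen.length + 1 := by simp
    rw [hz, hl]
    have hn : seen.length + 1 + tail.length = seen.length + (a :: tail).length := by
      simp; omega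
    rw [hn]
    rw [show (a :: tail).length = tail.length + 1 from rfl, List.range'_succ]
    rw [List.flatMap_cons]
    congr 1
    exact (chunk_eq seen tail a).symm

lemma pvGo_eq (z : List Int) :
    pvGo [] z = (pvPairsN z.length).map (fun p => (z.getD p.1 0, z.getD p.2 0)) := by
  rw [pvGo_spec z []]
  simp only [List.nil_append, List.length_nil, Nat.zero_add]
  rw [← List.range_eq_range']
  simp [pvPairsN, List.map_flatMap, List.map_map, Function.comp_def]

lemma getD_take (y : List Int) (n j : Nat) (hj : j < n) (hn : n ≤ y.length) :
    (y.take n).getD j 0 = y.getD j 0 := by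
  rw [List.getD_eq_getElem _ _ (by simp [List.length_take]; omega),
    List.getD_eq_getElem _ _ (by omega), List.getElem_take]

-- A's first double loop builds the two projections of pvIdx mapped through x / y
lemma phase1_eq (x y : List Int) :
    (PySem.List.pyRange 0 x.length 1).foldl (fun st i =>
      (PySem.List.pyRange 0 x.length 1).foldl (fun (st : List (List Int) × List (List Int)) j =>
        if i ≠ j then
          (st.1 ++ [[PySem.List.pyGetD x i 0, PySem.List.pyGetD x j 0]],
           st.2 ++ [[PySem.List.pyGetD y i 0, PySem.List.pyGetD y j 0]])
        else st) st) (([], []) : List (List Int) × List (List Int))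
    = ((pvIdx x.length).map (fun p => [PySem.List.pyGetD x p.1 0, PySem.List.pyGetD x p.2 0]),
       (pvIdx x.length).map (fun p => [PySem.List.pyGetD y p.1 0, PySem.List.pyGetD y p.2 0])) := by
  have hinner : ∀ (i : Int) (st : List (List Int) × List (List Int)),
      (PySem.List.pyRange 0 x.length 1).foldl (fun (st : List (List Int) × List (List Int)) j =>
        if i ≠ j then
          (st.1 ++ [[PySem.List.pyGetD x i 0, PySem.List.pyGetD x j 0]],
           st.2 ++ [[PySem.List.pyGetD y i 0, PySem.List.pyGetD y j 0]])
        else st) st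
      = (st.1 ++ (((PySem.List.pyRange 0 x.length 1).filter (fun j => i ≠ j)).map
            (fun j => [PySem.List.pyGetD x i 0, PySem.List.pyGetD x j 0])),
         st.2 ++ (((PySem.List.pyRange 0 x.length 1).filter (fun j => i ≠ j)).map
            (fun j => [PySem.List.pyGetD y i 0, PySem.List.pyGetD y j 0]))) := by
    intro i st
    rw [PySem.List.foldl_congr_mem _ _
      (fun (st : List (List Int) × List (List Int)) j =>
        ((if i ≠ j then st.1 ++ [[PySem.List.pyGetD x i 0, PySem.List.pyGetD x j 0]] else st.1),
         (if i ≠ j then st.2 ++ [[PySem.List.pyGetD y i 0, PySem.List.pyGetD y j 0]] else st.2))) _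
      (by intro acc j _; by_cases h : i = j <;> simp [h])]
    rw [PySem.List.foldl_prod_mk
      (fun s1 j => if i ≠ j then s1 ++ [[PySem.List.pyGetD x i 0, PySem.List.pyGetD x j 0]] else s1)
      (fun s2 j => if i ≠ j then s2 ++ [[PySem.List.pyGetD y i 0, PySem.List.pyGetD y j 0]] else s2)]
    rw [PySem.List.foldl_append_ite (p := fun j => i ≠ j)
      (f := fun j => [PySem.List.pyGetD x i 0, PySem.List.pyGetD x j 0])]
    rw [PySem.List.foldl_append_ite (p := fun j => i ≠ j)
      (f := fun j => [PySem.List.pyGetD y i 0, PySem.List.pyGetD y j 0])]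
  rw [PySem.List.foldl_congr_mem _ _
    (fun (st : List (List Int) × List (List Int)) i =>
      (st.1 ++ (((PySem.List.pyRange 0 x.length 1).filter (fun j => decide (i ≠ j))).map
          (fun j => [PySem.List.pyGetD x i 0, PySem.List.pyGetD x j 0])),
       st.2 ++ (((PySem.List.pyRange 0 x.length 1).filter (fun j => decide (i ≠ j))).map
          (fun j => [PySem.List.pyGetD y i 0, PySem.List.pyGetD y j 0])))) _
    (by intro acc i _; exact hinner i acc)]
  rw [PySem.List.foldl_prod_mk
    (fun s1 i => s1 ++ (((PySem.List.pyRange 0 x.length 1).filter (fun j => decide (i ≠ j))).map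
        (fun j => [PySem.List.pyGetD x i 0, PySem.List.pyGetD x j 0])))
    (fun s2 i => s2 ++ (((PySem.List.pyRange 0 x.length 1).filter (fun j => decide (i ≠ j))).map
        (fun j => [PySem.List.pyGetD y i 0, PySem.List.pyGetD y j 0])))]
  rw [PySem.List.foldl_append_eq_flatMap, PySem.List.foldl_append_eq_flatMap]
  simp [pvIdx, List.map_flatMap, List.map_map, Function.comp_def]

-- A's second double loop over two equal-length lists is the elementwise cross product
lemma phase2_eq (xp yp : List (List Int)) :
    (PySem.List.pyRange 0 xp.length 1).foldl (fun pairs i =>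
      (PySem.List.pyRange 0 yp.length 1).foldl (fun pairs j =>
        pairs ++ [[[PySem.List.pyGetD (PySem.List.pyGetD xp i []) 0 0,
                    PySem.List.pyGetD (PySem.List.pyGetD yp j []) 0 0],
                   [PySem.List.pyGetD (PySem.List.pyGetD xp i []) 1 0,
                    PySem.List.pyGetD (PySem.List.pyGetD yp j []) 1 0]]]) pairs) []
    = xp.flatMap (fun u => yp.map (fun v =>
        [[PySem.List.pyGetD u 0 0, PySem.List.pyGetD v 0 0],
         [PySem.List.pyGetD u 1 0, PySem.List.pyGetD v 1 0]])) := by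
  have hinner : ∀ (u : List Int) (acc : List (List (List Int))),
      (PySem.List.pyRange 0 yp.length 1).foldl (fun pairs j =>
        pairs ++ [[[PySem.List.pyGetD u 0 0,
                    PySem.List.pyGetD (PySem.List.pyGetD yp j []) 0 0],
                   [PySem.List.pyGetD u 1 0,
                    PySem.List.pyGetD (PySem.List.pyGetD yp j []) 1 0]]]) acc
      = acc ++ yp.map (fun v =>
          [[PySem.List.pyGetD u 0 0, PySem.List.pyGetD v 0 0],
           [PySem.List.pyGetD u 1 0, PySem.List.pyGetD v 1 0]]) := by
    intro u acc
    rw [PySem.List.foldl_pyRange_zero_pyGetD' yp []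
      (fun pairs v => pairs ++ [[[PySem.List.pyGetD u 0 0, PySem.List.pyGetD v 0 0],
                                 [PySem.List.pyGetD u 1 0, PySem.List.pyGetD v 1 0]]]) acc]
    rw [PySem.List.foldl_append_singleton_eq_map]
  rw [PySem.List.foldl_congr_mem _ _
    (fun pairs i =>
      pairs ++ yp.map (fun v =>
        [[PySem.List.pyGetD (PySem.List.pyGetD xp i []) 0 0, PySem.List.pyGetD v 0 0],
         [PySem.List.pyGetD (PySem.List.pyGetD xp i []) 1 0, PySem.List.pyGetD v 1 0]])) _
    (by intro acc i _; exact hinner (PySem.List.pyGetD xp i []) acc)]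
  rw [PySem.List.foldl_pyRange_zero_pyGetD' xp []
    (fun pairs u => pairs ++ yp.map (fun v =>
      [[PySem.List.pyGetD u 0 0, PySem.List.pyGetD v 0 0],
       [PySem.List.pyGetD u 1 0, PySem.List.pyGetD v 1 0]]) ) []]
  rw [PySem.List.foldl_append_eq_flatMap]
  simp


-- A in normal form: flatMap/map over the Nat-level index pairs
lemma A_norm (x y : List Int) :
    make_bigram_pairs x y
    = (pvPairsN x.length).flatMap (fun p => (pvPairsN x.length).map
        (fun q => [[x.getD p.1 0, y.getD q.1 0], [x.getD p.2 0, y.getD q.2 0]])) := by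
  simp only [make_bigram_pairs, phase1_eq]
  rw [phase2_eq, pvIdx_eq, List.flatMap_map]
  simp only [List.map_map, List.flatMap_map, Function.comp_def, PySem.List.pyGetD_natCast]
  congr 1

-- B in normal form
lemma B_norm (x y : List Int) :
    make_bigram_pairs_alt x y
    = (pvPairsN x.length).flatMap (fun p => (pvPairsN (y.take x.length).length).map
        (fun q => [[x.getD p.1 0, (y.take x.length).getD q.1 0],
                   [x.getD p.2 0, (y.take x.length).getD q.2 0]])) := by
  simp only [make_bigram_pairs_alt, PySem.List.slice_to_natCast, pvGo_eq, List.flatMap_map]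
  simp only [List.map_map, Function.comp_def]

-- ===== VERDICT (by name: the statement is the Claim_ definition above) =====
theorem make_bigram_pairs_spec : Claim_equal_make_bigram_pairs := by
  intro x y _ hpre
  show make_bigram_pairs x y = make_bigram_pairs_alt x y
  rw [A_norm, B_norm]
  by_cases h : x.length ≤ y.length
  · have hlen : (y.take x.length).length = x.length := by simp; omega
    refine List.flatMap_congr (fun p _ => ?_)
    rw [hlen]
    apply List.map_congr_left
    intro q hq
    obtain ⟨hq1, hq2⟩ := mem_pvPairsN hq
    rw [getD_take y x.length q.1 hq1 h, getD_take y x.length q.2 hq2 h]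
  · have h1 : x.length ≤ 1 := by
      rcases hpre with h1 | h1
      · exact h1
      · omega
    have hz : pvPairsN x.length = [] := by
      have : x.length = 0 ∨ x.length = 1 := by omega
      rcases this with h0 | h0 <;> rw [h0] <;> rfl
    rw [hz]
    simp
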